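-- pv_equiv track=rewrite | github.com/dzx0010/Group_CID_7180_final_project | translate.py | get_all_translations
-- ===== SOURCE A (Python) =====
-- def get_all_translations(rna_sequence, genetic_code):
--     sequence = rna_sequence.upper()
--     num_bases = len(sequence)-3
--     amino_acid_list = []
--     for a in range(num_bases+1):
--         start = sequence[a:a+3]
--         if start == 'AUG':
--             rna_seq = sequence[a:]
--             amino_acid_all= ""
--             for b in range(0,len(rna_seq)-2, 3):
--                 new = rna_seq[b:b+3]
--                 if genetic_code[new]== '*':
--                     break
--                 amino_acid_all+= genetic_code[new]
--             amino_acid_list.append(amino_acid_all)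
--     return amino_acid_list
--
--     """Get a list of all amino acid sequences encoded by an RNA sequence.
--
--     All three reading frames of `rna_sequence` are scanned from 'left' to
--     'right', and the generation of a sequence of amino acids is started
--     whenever the start codon 'AUG' is found. The `rna_sequence` is assumed to
--     be in the correct orientation (i.e., no reverse and/or complement of the
--     sequence is explored).
--
--     The function returns a list of all possible amino acid sequences that
--     are encoded by `rna_sequence`.
--
--     If no amino acids can be translated from `rna_sequence`, an empty list is
--     returned.
--
--     Parameters
--     ----------
--     rna_sequence : str
--         A string representing an RNA sequence (upper or lower-case).
--
--     genetic_code : dict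
--         A dictionary mapping all 64 codons (strings of three RNA bases) to
--         amino acids (string of single-letter amino acid abbreviation). Stop
--         codons should be represented with asterisks ('*').
--
--     Returns
--     -------
--     list
--         A list of strings; each string is an sequence of amino acids encoded by
--         `rna_sequence`.
--     """
-- ===== SOURCE B (Python) =====
-- def get_all_translations(rna_sequence, genetic_code):
--     seq = rna_sequence.upper()
--     n = len(seq)
--     cache = {}
--
--     def translate_from(a):
--         # walk forward until end of sequence, a stop codon, or a cached suffix
--         stack = []
--         i = a
--         while True:
--             if i in cache:
--                 res = cache[i]
--                 break
--             if i + 3 > n: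
--                 res = ""
--                 break
--             aa = genetic_code[seq[i:i + 3]]
--             if aa == '*':
--                 res = ""
--                 break
--             stack.append((i, aa))
--             i += 3
--         # unwind, memoizing every suffix translation on the way back
--         for j, aa in reversed(stack):
--             res = aa + res
--             cache[j] = res
--         return res
--
--     translations = []
--     for a in range(n - 2):
--         if seq[a:a + 3] == 'AUG':
--             translations.append(translate_from(a))
--     return translations
-- ===== Notes on version B (the rewrite author's own statement) =====
-- stated objective: alternative
-- what changed: B replaces A's per-AUG re-translation inner loop with a lazily memoized suffix translation (walk forward to end/stop/cached suffix, then unwind caching every suffix), so overlapping reading frames share their common suffix instead of being re-translated from scratch.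
import Mathlib
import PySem

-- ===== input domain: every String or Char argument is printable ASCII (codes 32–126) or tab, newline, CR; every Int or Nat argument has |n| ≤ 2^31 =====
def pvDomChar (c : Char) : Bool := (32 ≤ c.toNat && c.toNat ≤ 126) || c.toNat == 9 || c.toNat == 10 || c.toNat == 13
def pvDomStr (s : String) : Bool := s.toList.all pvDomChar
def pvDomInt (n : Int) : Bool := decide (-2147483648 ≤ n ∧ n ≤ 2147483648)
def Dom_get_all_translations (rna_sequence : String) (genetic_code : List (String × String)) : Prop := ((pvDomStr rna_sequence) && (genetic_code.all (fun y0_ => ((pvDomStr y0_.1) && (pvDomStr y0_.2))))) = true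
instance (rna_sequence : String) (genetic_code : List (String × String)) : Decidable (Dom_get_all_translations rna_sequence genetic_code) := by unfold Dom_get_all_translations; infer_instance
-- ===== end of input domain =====

-- B replaces A's per-start re-translation loop with a lazily memoized suffix translation
-- (walk forward to end/stop/cached suffix, then unwind caching every suffix), sharing
-- overlapping suffixes between 'AUG' starts; objective: alternative algorithm.

-- ===== PORT A =====
-- inner 'for b in range(0, len(rna_seq)-2, 3)' loop with its break; acc is the growing
-- amino-acid string as List Char
def transLoopA (code : PySem.Dict String String) (rna_seq : List Char) (bs : List Int)
    (acc : List Char) : List Char :=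
  match bs with
  | [] => acc
  | b :: rest =>
    let nw := String.mk (PySem.List.slice rna_seq (some b) (some (b + 3)))
    match code.get? nw with
    | none => acc  -- Python raises KeyError here; such inputs are excluded by Pre_
    | some aa => if aa = "*" then acc else transLoopA code rna_seq rest (acc ++ aa.toList)

-- outer 'for a in range(num_bases+1)' loop
def outerA (code : PySem.Dict String String) (cs : List Char) : List Int → List String → List String
  | [], acc => acc
  | a :: rest, acc =>
    if PySem.List.slice cs (some a) (some (a + 3)) = ['A', 'U', 'G'] then
      let rna_seq := PySem.List.slice cs (some a) none
      let s := transLoopA code rna_seq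
        (PySem.List.pyRange 0 ((rna_seq.length : Int) - 2) 3) []
      outerA code cs rest (acc ++ [String.mk s])
    else outerA code cs rest acc

def get_all_translations (rna_sequence : String) (genetic_code : List (String × String)) : List String :=
  let sequence := PySem.Chars.upper rna_sequence.toList
  let num_bases : Int := (sequence.length : Int) - 3
  outerA (PySem.Dict.ofList genetic_code) sequence
    (PySem.List.pyRange 0 (num_bases + 1) 1) []

-- ===== PORT B =====
-- the 'while True' walk of translate_from: collect (position, amino acid) pairs until
-- end of sequence, a stop codon, or a cached suffix; returns (stack, res)
def walkB (code : PySem.Dict String String) (cs : List Char) (cache : PySem.Dict Nat (List Char))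
    (i : Nat) (stack : List (Nat × List Char)) : List (Nat × List Char) × List Char :=
  match cache.get? i with
  | some r => (stack, r)
  | none =>
    if h : cs.length < i + 3 then (stack, [])
    else
      match code.get? (String.mk (PySem.List.slice cs (some (i : Int)) (some ((i : Int) + 3)))) with
      | none => (stack, [])  -- Python raises KeyError here; such inputs are excluded by Pre_
      | some aa => if aa = "*" then (stack, []) else walkB code cs cache (i + 3) (stack ++ [(i, aa.toList)])
termination_by cs.length - i
decreasing_by omega

-- the 'for j, aa in reversed(stack)' unwind loop (applied to stack.reverse)
def unwindB (items : List (Nat × List Char)) (res : List Char) (cache : PySem.Dict Nat (List Char)) :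
    List Char × PySem.Dict Nat (List Char) :=
  match items with
  | [] => (res, cache)
  | (j, aa) :: rest => unwindB rest (aa ++ res) (cache.insert j (aa ++ res))

def transB (code : PySem.Dict String String) (cs : List Char) (a : Nat)
    (cache : PySem.Dict Nat (List Char)) : List Char × PySem.Dict Nat (List Char) :=
  let (st, r) := walkB code cs cache a []
  unwindB st.reverse r cache

-- the final 'for a in range(n-2)' loop, threading the cache
def goB (code : PySem.Dict String String) (cs : List Char) :
    List Nat → PySem.Dict Nat (List Char) → List String → List String
  | [], _, acc => acc
  | a :: rest, cache, acc =>
    if PySem.List.slice cs (some (a : Int)) (some ((a : Int) + 3)) = ['A', 'U', 'G'] then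
      let (r, cache') := transB code cs a cache
      goB code cs rest cache' (acc ++ [String.mk r])
    else goB code cs rest cache acc

def get_all_translations_alt (rna_sequence : String) (genetic_code : List (String × String)) : List String :=
  let seq := PySem.Chars.upper rna_sequence.toList
  goB (PySem.Dict.ofList genetic_code) seq (List.range (seq.length - 2)) PySem.Dict.empty []

-- ===== PRECONDITION & SPEC =====
-- Pre_ excludes exactly the inputs on which Python A raises KeyError: some 'AUG' start a
-- reaches (through present, non-stop codons) a codon position whose codon is not a key of
-- genetic_code.
def Pre_get_all_translations (rna_sequence : String) (genetic_code : List (String × String)) : Prop :=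
  ∀ a ∈ List.range ((PySem.Chars.upper rna_sequence.toList).length - 2),
    ((PySem.Chars.upper rna_sequence.toList).drop a).take 3 = ['A', 'U', 'G'] →
    ∀ j ∈ List.range (PySem.Chars.upper rna_sequence.toList).length,
      a + 3 * j + 3 ≤ (PySem.Chars.upper rna_sequence.toList).length →
      (∀ i ∈ List.range j,
        (PySem.Dict.ofList genetic_code).getD
          (String.mk (((PySem.Chars.upper rna_sequence.toList).drop (a + 3 * i)).take 3)) "*" ≠ "*") →
      ((PySem.Dict.ofList genetic_code).get?
        (String.mk (((PySem.Chars.upper rna_sequence.toList).drop (a + 3 * j)).take 3))).isSome = true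

instance (rna_sequence : String) (genetic_code : List (String × String)) :
    Decidable (Pre_get_all_translations rna_sequence genetic_code) := by
  unfold Pre_get_all_translations; infer_instance

def pvWitness_get_all_translations : String × (List (String × String)) :=
  ("gAUGGCAUAAC", [("AUG", "M"), ("GCA", "A"), ("UAA", "*"), ("AUA", "I")])

def Spec_get_all_translations (rna_sequence : String) (genetic_code : List (String × String)) (out : List String) : Prop := out = get_all_translations_alt rna_sequence genetic_code
instance (rna_sequence : String) (genetic_code : List (String × String)) (out : List String) : Decidable (Spec_get_all_translations rna_sequence genetic_code out) := by unfold Spec_get_all_translations; infer_instance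

-- ===== CLAIM (what is proved, stated in full; the proofs are below) =====
def Claim_equal_get_all_translations : Prop := ∀ (rna_sequence : String) (genetic_code : List (String × String)), Dom_get_all_translations rna_sequence genetic_code → Pre_get_all_translations rna_sequence genetic_code → Spec_get_all_translations rna_sequence genetic_code (get_all_translations rna_sequence genetic_code)

-- ===== LEMMAS AND PROOFS =====

-- the mathematical translation-from-position-i function both loops compute
def pureT (code : PySem.Dict String String) (cs : List Char) (i : Nat) : List Char :=
  if h : cs.length < i + 3 then []
  else
    match code.get? (String.mk ((cs.drop i).take 3)) with
    | none => []
    | some aa => if aa = "*" then [] else aa.toList ++ pureT code cs (i + 3)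
termination_by cs.length - i
decreasing_by omega

def CacheOK (code : PySem.Dict String String) (cs : List Char) (cache : PySem.Dict Nat (List Char)) : Prop :=
  ∀ k r, cache.get? k = some r → r = pureT code cs k

-- a step-3 range cons/nil characterisation (induction forms for pyRange with step 3)
theorem pyRange3_nil (a b : Int) (h : b ≤ a) : PySem.List.pyRange a b 3 = [] := by
  rw [PySem.List.pyRange_of_pos a b (by norm_num)]
  simp [if_neg (by omega : ¬ a < b)]

theorem pyRange3_cons (a b : Int) (h : a < b) :
    PySem.List.pyRange a b 3 = a :: PySem.List.pyRange (a + 3) b 3 := by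
  rw [PySem.List.pyRange_of_pos a b (by norm_num),
      PySem.List.pyRange_of_pos (a + 3) b (by norm_num)]
  rw [if_pos h]
  by_cases h3 : a + 3 < b
  · rw [if_pos h3]
    have hN : ((b - a + 3 - 1) / 3).toNat = ((b - (a + 3) + 3 - 1) / 3).toNat + 1 := by omega
    rw [hN, List.range_succ_eq_map]
    simp only [List.map_cons, Nat.cast_zero, mul_zero, add_zero, List.map_map]
    congr 1
    apply List.map_congr_left
    intro k _
    simp only [Function.comp_apply]
    push_cast
    ring
  · rw [if_neg h3]
    have hN : ((b - a + 3 - 1) / 3).toNat = 1 := by omega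
    rw [hN]
    simp

-- A's inner loop computes pureT
theorem transLoopA_eq (code : PySem.Dict String String) (cs : List Char) (a k : Nat)
    (acc : List Char) :
    transLoopA code (cs.drop a)
      (PySem.List.pyRange (3 * (k : Nat) : Int) (((cs.length - a : Nat) : Int) - 2) 3) acc
      = acc ++ pureT code cs (a + 3 * k) := by
  by_cases hend : cs.length < a + 3 * k + 3
  · rw [pyRange3_nil _ _ (by omega)]
    rw [pureT]
    simp [transLoopA, dif_pos hend]
  · rw [pyRange3_cons _ _ (by omega)]
    rw [transLoopA]
    have hsl : PySem.List.slice (cs.drop a) (some (3 * (k : Nat) : Int)) (some ((3 * (k : Nat) : Int) + 3)) =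
        ((cs.drop (a + 3 * k)).take 3) := by
      have : (3 * (k : Nat) : Int) = ((3 * k : Nat) : Int) := by push_cast; ring
      rw [this]
      have h3 : ((3 * k : Nat) : Int) + 3 = ((3 * k : Nat) : Int) + ((3 : Nat) : Int) := by norm_num
      rw [h3, PySem.List.slice_natCast_add, List.drop_drop]
    rw [hsl]
    rw [pureT, dif_neg hend]
    cases hc : code.get? (String.mk ((cs.drop (a + 3 * k)).take 3)) with
    | none => simp
    | some aa =>
      by_cases hstop : aa = "*"
      · simp [hstop]
      · simp only [hstop, if_neg hstop, if_false]
        have h3k : (3 * (k : Nat) : Int) + 3 = (3 * ((k + 1 : Nat) : Nat) : Int) := by push_cast; ring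
        rw [h3k, transLoopA_eq code cs a (k + 1) (acc ++ aa.toList)]
        have : a + 3 * (k + 1) = a + 3 * k + 3 := by ring
        rw [this, List.append_assoc]
termination_by cs.length - (a + 3 * k)
decreasing_by omega

-- the walk produces a chain of present non-stop codons ending in a pureT value
def Chain (code : PySem.Dict String String) (cs : List Char) : Nat → List (Nat × List Char) → List Char → Prop
  | i, [], r => r = pureT code cs i
  | i, (j, aa) :: tl, r =>
      j = i ∧ (∃ s, code.get? (String.mk ((cs.drop i).take 3)) = some s ∧ s ≠ "*" ∧ aa = s.toList
                ∧ cs.length ≥ i + 3)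
      ∧ Chain code cs (i + 3) tl r

theorem walkB_spec (code : PySem.Dict String String) (cs : List Char)
    (cache : PySem.Dict Nat (List Char)) (hc : CacheOK code cs cache) (i : Nat)
    (stack : List (Nat × List Char)) :
    ∃ tl r, walkB code cs cache i stack = (stack ++ tl, r) ∧ Chain code cs i tl r := by
  rw [walkB]
  cases hget : cache.get? i with
  | some r =>
    exact ⟨[], r, by simp, hc i r hget⟩
  | none =>
    by_cases hend : cs.length < i + 3
    · refine ⟨[], [], by simp [dif_pos hend], ?_⟩
      show ([] : List Char) = pureT code cs i
      rw [pureT, dif_pos hend]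
    · simp only [dif_neg hend]
      have hsl : PySem.List.slice cs (some (i : Int)) (some ((i : Int) + 3)) = (cs.drop i).take 3 := by
        have h3 : ((i : Nat) : Int) + 3 = ((i : Nat) : Int) + ((3 : Nat) : Int) := by norm_num
        rw [h3, PySem.List.slice_natCast_add]
      rw [hsl]
      cases hcod : code.get? (String.mk ((cs.drop i).take 3)) with
      | none =>
        refine ⟨[], [], by simp, ?_⟩
        show ([] : List Char) = pureT code cs i
        rw [pureT, dif_neg hend, hcod]
      | some aa =>
        by_cases hstop : aa = "*"
        · refine ⟨[], [], by simp [hstop], ?_⟩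
          show ([] : List Char) = pureT code cs i
          rw [pureT, dif_neg hend, hcod]
          simp [hstop]
        · simp only [if_neg hstop]
          obtain ⟨tl, r, heq, hch⟩ := walkB_spec code cs cache hc (i + 3) (stack ++ [(i, aa.toList)])
          exact ⟨(i, aa.toList) :: tl, r, by simpa using heq,
                 ⟨rfl, ⟨aa, hcod, hstop, rfl, by omega⟩, hch⟩⟩
termination_by cs.length - i
decreasing_by omega

theorem unwindB_append (L1 L2 : List (Nat × List Char)) (res : List Char)
    (cache : PySem.Dict Nat (List Char)) :
    unwindB (L1 ++ L2) res cache =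
      unwindB L2 (unwindB L1 res cache).1 (unwindB L1 res cache).2 := by
  induction L1 generalizing res cache with
  | nil => simp [unwindB]
  | cons p rest ih =>
    obtain ⟨j, aa⟩ := p
    simp [unwindB, ih]

theorem cacheOK_insert (code : PySem.Dict String String) (cs : List Char)
    (cache : PySem.Dict Nat (List Char)) (hc : CacheOK code cs cache) (j : Nat)
    (v : List Char) (hv : v = pureT code cs j) :
    CacheOK code cs (cache.insert j v) := by
  intro k r hk
  by_cases hkj : k = j
  · subst hkj
    rw [PySem.Dict.get?_insert_self] at hk
    cases hk; exact hv
  · rw [PySem.Dict.get?_insert_of_ne _ _ hkj] at hk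
    exact hc k r hk

theorem unwindB_chain (code : PySem.Dict String String) (cs : List Char)
    (tl : List (Nat × List Char)) :
    ∀ (i : Nat) (r : List Char) (cache : PySem.Dict Nat (List Char)),
      Chain code cs i tl r → CacheOK code cs cache →
      (unwindB tl.reverse r cache).1 = pureT code cs i ∧
        CacheOK code cs (unwindB tl.reverse r cache).2 := by
  induction tl with
  | nil =>
    intro i r cache hch hc
    simp only [List.reverse_nil, unwindB]
    exact ⟨hch, hc⟩
  | cons p rest ih =>
    intro i r cache hch hc
    obtain ⟨j, aa⟩ := p
    obtain ⟨rfl, ⟨s, hcod, hstop, rfl, hlen⟩, hch'⟩ := hch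
    have hpure : pureT code cs j = s.toList ++ pureT code cs (j + 3) := by
      rw [pureT, dif_neg (by omega), hcod]
      simp [hstop]
    obtain ⟨h1, h2⟩ := ih (j + 3) r cache hch' hc
    rw [List.reverse_cons, unwindB_append]
    rw [unwindB, unwindB, h1]
    constructor
    · exact hpure.symm
    · exact cacheOK_insert code cs _ h2 j _ (by rw [hpure])

theorem transB_spec (code : PySem.Dict String String) (cs : List Char) (a : Nat)
    (cache : PySem.Dict Nat (List Char)) (hc : CacheOK code cs cache) :
    (transB code cs a cache).1 = pureT code cs a ∧
      CacheOK code cs (transB code cs a cache).2 := by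
  obtain ⟨tl, r, heq, hch⟩ := walkB_spec code cs cache hc a []
  unfold transB
  rw [heq]
  simpa using unwindB_chain code cs tl a r cache hch hc

-- the two outer loops agree, given a correct cache
theorem outer_eq (code : PySem.Dict String String) (cs : List Char) (as_ : List Nat) :
    ∀ (cache : PySem.Dict Nat (List Char)), CacheOK code cs cache → ∀ (acc : List String),
    outerA code cs (List.map (fun (k : Nat) => (k : Int)) as_) acc = goB code cs as_ cache acc := by
  induction as_ with
  | nil => intro cache hc acc; simp [outerA, goB]
  | cons a rest ih =>
    intro cache hc acc
    simp only [List.map_cons, outerA, goB]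
    have hinner : transLoopA code (PySem.List.slice cs (some (a : Int)) none)
        (PySem.List.pyRange 0 (((PySem.List.slice cs (some (a : Int)) none).length : Int) - 2) 3) []
        = pureT code cs a := by
      rw [PySem.List.slice_from_natCast]
      have hlen : ((cs.drop a).length : Int) = ((cs.length - a : Nat) : Int) := by
        simp [List.length_drop]
      rw [hlen]
      have h0 : (0 : Int) = (3 * ((0 : Nat) : Nat) : Int) := by norm_num
      rw [h0, transLoopA_eq code cs a 0 []]
      simp
    by_cases haug : PySem.List.slice cs (some (a : Int)) (some ((a : Int) + 3)) = ['A', 'U', 'G']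
    · rw [if_pos haug, if_pos haug]
      obtain ⟨h1, h2⟩ := transB_spec code cs a cache hc
      cases htp : transB code cs a cache with
      | mk r' cache' =>
        rw [htp] at h1 h2
        simp only at h1 h2
        subst h1
        rw [hinner]
        exact ih cache' h2 (acc ++ [String.mk (pureT code cs a)])
    · rw [if_neg haug, if_neg haug]
      exact ih cache hc acc

-- range bound bridge: pyRange 0 ((len:Int)-3+1) 1 is the cast of List.range (len-2)
theorem range_bridge (n : Nat) :
    PySem.List.pyRange 0 ((n : Int) - 3 + 1) 1 = List.map (fun (k : Nat) => (k : Int)) (List.range (n - 2)) := by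
  by_cases h2 : 2 ≤ n
  · rw [show (n : Int) - 3 + 1 = ((n - 2 : Nat) : Int) by omega, PySem.List.pyRange_zero_natCast]
  · rw [PySem.List.pyRange_one_eq_nil (by omega), show n - 2 = 0 from by omega]
    simp

-- ===== VERDICT (by name: the statement is the Claim_ definition above) =====
theorem get_all_translations_spec : Claim_equal_get_all_translations := by
  intro rna_sequence genetic_code _ _
  unfold Spec_get_all_translations get_all_translations get_all_translations_alt
  simp only []
  rw [range_bridge]
  exact outer_eq _ _ _ _ (fun k r hk => by simp [PySem.Dict.get?, PySem.Dict.empty] at hk) []
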